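-- pv_equiv track=rewrite | github.com/AdnaneEmbouazza/TP_PYTHON | CCF_entrainenemnt3.py | divTab
-- ===== SOURCE A (Python) =====
-- def divTab(a):
--     tab = []
--     i= 1
--     while (i<=a and len(tab)<10):
--         if (a%i == 0):
--             tab.append(i)
--         i=i+1
--     return tab
-- ===== SOURCE B (Python) =====
-- def divTab(a):
--     # Trial division up to sqrt(a): collect divisor pairs (d, a//d), then
--     # splice small divisors with the large ones (reversed) and take the first 10.
--     small = []
--     large = []
--     d = 1
--     while d * d <= a:
--         if a % d == 0:
--             small.append(d)
--             if d * d != a: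
--                 large.append(a // d)
--         d += 1
--     return (small + large[::-1])[:10]
-- ===== Notes on version B (the rewrite author's own statement) =====
-- stated objective: faster
-- what changed: B scans only up to sqrt(a), collecting each divisor d together with its cofactor a//d, then splices the small divisors with the reversed cofactor list and keeps the leading ten, instead of A's linear scan of 1..a.
import Mathlib
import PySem

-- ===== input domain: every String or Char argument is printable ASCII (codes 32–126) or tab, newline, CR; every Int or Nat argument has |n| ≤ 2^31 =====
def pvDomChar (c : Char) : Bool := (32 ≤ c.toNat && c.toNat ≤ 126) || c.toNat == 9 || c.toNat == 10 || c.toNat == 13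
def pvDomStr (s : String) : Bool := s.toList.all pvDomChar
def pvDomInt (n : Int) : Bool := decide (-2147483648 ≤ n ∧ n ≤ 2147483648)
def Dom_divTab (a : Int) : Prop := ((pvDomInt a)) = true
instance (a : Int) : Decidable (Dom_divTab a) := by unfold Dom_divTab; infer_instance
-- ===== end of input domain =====

-- B replaces A's linear scan of 1..a by trial division up to sqrt(a) collecting divisor
-- pairs (d, a//d), then returns the leading ten of small ++ reversed large (objective: faster).

-- ===== PORT A =====
def divTabLoopA (a i : Int) (tab : List Int) : List Int :=
  if h : i ≤ a ∧ tab.length < 10 then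
    divTabLoopA a (i + 1) (if PySem.Int.mod a i == 0 then tab ++ [i] else tab)
  else tab
termination_by (a + 1 - i).toNat
decreasing_by omega

def divTab (a : Int) : List Int := divTabLoopA a 1 []

-- ===== PORT B =====
def divTabLoopB (a d : Int) (small large : List Int) : List Int × List Int :=
  if h : d * d ≤ a then
    if PySem.Int.mod a d == 0 then
      divTabLoopB a (d + 1) (small ++ [d])
        (if d * d ≠ a then large ++ [PySem.Int.floordiv a d] else large)
    else divTabLoopB a (d + 1) small large
  else (small, large)
termination_by (a + 1 - d).toNat
decreasing_by
  · have : d ≤ a := by nlinarith [sq_nonneg (d - 1)]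
    omega
  · have : d ≤ a := by nlinarith [sq_nonneg (d - 1)]
    omega

def divTab_alt (a : Int) : List Int :=
  let p := divTabLoopB a 1 [] []
  -- large[::-1] is List.reverse; the slice [:10] on a list is List.take 10
  (p.1 ++ p.2.reverse).take 10

-- ===== PRECONDITION & SPEC =====
def Spec_divTab (a : Int) (out : List Int) : Prop := out = divTab_alt a
instance (a : Int) (out : List Int) : Decidable (Spec_divTab a out) := by unfold Spec_divTab; infer_instance

-- ===== CLAIM (what is proved, stated in full; the proofs are below) =====
def Claim_equal_divTab : Prop := ∀ (a : Int), Dom_divTab a → Spec_divTab a (divTab a)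

-- ===== LEMMAS AND PROOFS =====

-- the integer segment [i, i+n)
def seg : Int → Nat → List Int
  | _, 0 => []
  | i, n + 1 => i :: seg (i + 1) n

theorem mem_seg (x : Int) : ∀ (n : Nat) (i : Int), x ∈ seg i n ↔ i ≤ x ∧ x < i + n := by
  intro n
  induction n with
  | zero => intro i; simp [seg]
  | succ m ih => intro i; simp only [seg, List.mem_cons, ih (i + 1)]; push_cast; omega

theorem seg_split (m : Nat) : ∀ (k : Nat) (i : Int), seg i (m + k) = seg i m ++ seg (i + m) k := by
  induction m with
  | zero => intro k i; simp [seg]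
  | succ m' ih =>
      intro k i
      have : m' + 1 + k = (m' + k) + 1 := by omega
      rw [this]
      have e : i + 1 + (m' : Int) = i + ((m' : Int) + 1) := by ring
      simp only [seg, ih k (i + 1), List.cons_append, e]
      push_cast
      rfl

theorem seg_pairwise_lt : ∀ (n : Nat) (i : Int), (seg i n).Pairwise (· < ·) := by
  intro n
  induction n with
  | zero => intro i; simp [seg]
  | succ m ih =>
      intro i
      simp only [seg, List.pairwise_cons]
      refine ⟨fun x hx => ?_, ih (i + 1)⟩
      have := (mem_seg x m (i + 1)).1 hx
      omega

-- characterization of A's loop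
theorem loopA_eq (a : Int) : ∀ (n : Nat) (i : Int) (tab : List Int), (a + 1 - i).toNat = n →
    divTabLoopA a i tab
      = tab ++ ((seg i n).filter (fun j => PySem.Int.mod a j == 0)).take (10 - tab.length) := by
  intro n
  induction n with
  | zero =>
      intro i tab hn
      have hia : ¬ i ≤ a := by omega
      rw [divTabLoopA]
      simp [hia, seg]
  | succ m ih =>
      intro i tab hn
      have hia : i ≤ a := by omega
      rw [divTabLoopA]
      by_cases hlen : tab.length < 10
      · simp only [hia, hlen, and_self, dite_true]
        by_cases hp : (PySem.Int.mod a i == 0) = true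
        · rw [if_pos hp, ih (i + 1) (tab ++ [i]) (by omega)]
          simp only [seg, List.filter_cons, hp, if_pos]
          simp
          have : 10 - tab.length = (10 - (tab.length + 1)) + 1 := by omega
          rw [this]
          simp
        · rw [if_neg hp, ih (i + 1) tab (by omega)]
          simp only [seg, List.filter_cons]
          simp [hp]
      · simp [hia, hlen]
        omega

-- characterization of B's loop, for d between 1 and s+1 where s*s ≤ a < (s+1)*(s+1)
theorem loopB_eq (a s : Int) (hs1 : 1 ≤ s) (hsa : s * s ≤ a) (hsa' : a < (s + 1) * (s + 1)) :
    ∀ (n : Nat) (d : Int) (small large : List Int), 1 ≤ d → (s + 1 - d).toNat = n →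
    divTabLoopB a d small large
      = (small ++ (seg d n).filter (fun j => PySem.Int.mod a j == 0),
         large ++ ((seg d n).filter (fun j => PySem.Int.mod a j == 0 && !(j * j == a))).map
                  (fun j => PySem.Int.floordiv a j)) := by
  intro n
  induction n with
  | zero =>
      intro d small large hd hn
      have hds : s < d := by omega
      have hcond : ¬ d * d ≤ a := by nlinarith
      rw [divTabLoopB]
      simp [hcond, seg]
  | succ m ih =>
      intro d small large hd hn
      have hds : d ≤ s := by omega
      have hcond : d * d ≤ a := by nlinarith
      rw [divTabLoopB]
      simp only [hcond, dite_true]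
      by_cases hp : (PySem.Int.mod a d == 0) = true
      · rw [if_pos hp]
        by_cases hq : d * d = a
        · rw [if_neg (by simpa using hq), ih (d + 1) (small ++ [d]) large (by omega) (by omega)]
          simp only [seg, List.filter_cons, hp]
          simp [hq]
        · rw [if_pos hq, ih (d + 1) (small ++ [d]) (large ++ [PySem.Int.floordiv a d]) (by omega) (by omega)]
          simp only [seg, List.filter_cons, hp]
          simp [hq]
      · rw [if_neg hp, ih (d + 1) small large (by omega) (by omega)]
        simp only [seg, List.filter_cons]
        simp [hp]

-- both trivially [] for a ≤ 0
theorem both_nonpos (a : Int) (ha : a ≤ 0) : divTab a = divTab_alt a := by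
  have h1 : ¬ (1 : Int) ≤ a := by omega
  have h2 : ¬ (1 : Int) * 1 ≤ a := by omega
  rw [divTab, divTab_alt, divTabLoopA, divTabLoopB]
  simp [h1]

theorem mod_filter_eq (a : Int) (n : Nat) (i : Int) (hi : 1 ≤ i) :
    (seg i n).filter (fun j => PySem.Int.mod a j == 0)
      = (seg i n).filter (fun j => decide (j ∣ a)) := by
  apply List.filter_congr
  intro x hx
  have hx1 : 1 ≤ x := by have := (mem_seg x n i).1 hx; omega
  rw [Bool.eq_iff_iff]
  simp [PySem.Int.mod_eq_zero_iff_dvd]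

-- arithmetic helpers about divisor cofactors
theorem cof_pos (a x : Int) (ha : 1 ≤ a) (hx : 1 ≤ x) (dx : x ∣ a) : 1 ≤ a / x := by
  have ex : x * (a / x) = a := Int.mul_ediv_cancel' dx
  nlinarith

theorem cof_antitone (a x y : Int) (ha : 1 ≤ a) (hx : 1 ≤ x) (hxy : x < y)
    (dx : x ∣ a) (dy : y ∣ a) : a / y < a / x := by
  have ex : x * (a / x) = a := Int.mul_ediv_cancel' dx
  have ey : y * (a / y) = a := Int.mul_ediv_cancel' dy
  have q1 : 1 ≤ a / x := cof_pos a x ha hx dx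
  have q2 : 1 ≤ a / y := cof_pos a y ha (by omega) dy
  by_contra h
  push_neg at h
  nlinarith

-- the crux: divisors of a in (s, a] are exactly the cofactors a / j of divisors j ≤ s
-- with j * j ≠ a, in reverse order
set_option maxHeartbeats 1000000 in
theorem cofactor_eq (a s : Int) (ha : 1 ≤ a) (hs1 : 1 ≤ s) (hsa : s * s ≤ a)
    (hsa' : a < (s + 1) * (s + 1)) (S N : Nat) (hS : (S : Int) = s) (hN : (N : Int) = a) :
    (seg (s + 1) (N - S)).filter (fun j => decide (j ∣ a))
      = ((((seg 1 S).filter (fun j => decide (j ∣ a) && !(j * j == a))).map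
          (fun j => a / j)).reverse) := by
  have hSN : S ≤ N := by
    have : s ≤ a := by nlinarith
    omega
  have hcast : ((N - S : Nat) : Int) = a - s := by omega
  -- pairwise facts
  have plf : ((seg (s + 1) (N - S)).filter (fun j => decide (j ∣ a))).Pairwise (· < ·) :=
    List.Pairwise.sublist List.filter_sublist (seg_pairwise_lt _ _)
  have ps : ((seg 1 S).filter (fun j => decide (j ∣ a) && !(j * j == a))).Pairwise (· < ·) :=
    List.Pairwise.sublist List.filter_sublist (seg_pairwise_lt _ _)
  have pL : ((((seg 1 S).filter (fun j => decide (j ∣ a) && !(j * j == a))).map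
      (fun j => a / j))).Pairwise (fun x y => y < x) := by
    rw [List.pairwise_map]
    refine List.Pairwise.imp_of_mem ?_ ps
    intro x y hx hy hxy
    simp only [List.mem_filter, Bool.and_eq_true, decide_eq_true_eq] at hx hy
    have hx1 : 1 ≤ x := by have := (mem_seg x S 1).1 hx.1; omega
    exact cof_antitone a x y ha hx1 hxy hx.2.1 hy.2.1
  have pLrev : ((((seg 1 S).filter (fun j => decide (j ∣ a) && !(j * j == a))).map
      (fun j => a / j)).reverse).Pairwise (· < ·) := List.pairwise_reverse.2 pL
  -- membership
  have memiff : ∀ x, x ∈ (seg (s + 1) (N - S)).filter (fun j => decide (j ∣ a)) ↔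
      x ∈ ((((seg 1 S).filter (fun j => decide (j ∣ a) && !(j * j == a))).map
          (fun j => a / j)).reverse) := by
    intro x
    simp only [List.mem_reverse, List.mem_map, List.mem_filter, Bool.and_eq_true,
      decide_eq_true_eq, Bool.not_eq_true', beq_eq_false_iff_ne, ne_eq,
      mem_seg, hcast]
    constructor
    · rintro ⟨⟨hxl, hxr⟩, hdx⟩
      have hx1 : 1 ≤ x := by omega
      have hxa : x ≤ a := by omega
      have ex : x * (a / x) = a := Int.mul_ediv_cancel' hdx
      refine ⟨a / x, ⟨⟨?_, ?_⟩, ?_, ?_⟩, ?_⟩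
      · nlinarith
      · -- a / x < 1 + S, i.e. a / x ≤ s
        have : a / x ≤ s := by nlinarith
        omega
      · exact ⟨x, by nlinarith⟩
      · intro h
        have hj1 : 1 ≤ a / x := by nlinarith
        have h2 : (x - a / x) * (a / x) = 0 := by linear_combination ex - h
        have h3 : x = a / x := by
          rcases mul_eq_zero.mp h2 with h4 | h4
          · omega
          · omega
        rw [← h3] at ex
        nlinarith
      · have hne : a / x ≠ 0 := by
          have : 1 ≤ a / x := by nlinarith
          omega
        calc a / (a / x) = (a / x) * x / (a / x) := by rw [mul_comm, ex]
          _ = x := Int.mul_ediv_cancel_left x hne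
    · rintro ⟨j, ⟨⟨hj1, hjS⟩, hdj, hne⟩, hx⟩
      have hjs : j ≤ s := by omega
      have ej : j * (a / j) = a := Int.mul_ediv_cancel' hdj
      subst hx
      have hq1 : 1 ≤ a / j := cof_pos a j ha hj1 hdj
      refine ⟨⟨?_, ?_⟩, ⟨j, by linear_combination -ej⟩⟩
      · -- s + 1 ≤ a / j
        by_contra h
        push_neg at h
        have hle : a / j ≤ s := by omega
        have hm1 : j * (a / j) ≤ s * s :=
          mul_le_mul hjs hle (by omega) (by omega)
        have h1 : a = s * s := le_antisymm (by omega) hsa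
        have hm2 : j * (a / j) ≤ j * s := mul_le_mul_of_nonneg_left hle (by omega)
        have h2 : s ≤ j := by nlinarith
        have h3 : j = s := le_antisymm hjs h2
        exact hne (by rw [h3, ← h1])
      · nlinarith
  -- conclude: both strictly sorted with the same members
  have n1 : ((seg (s + 1) (N - S)).filter (fun j => decide (j ∣ a))).Nodup :=
    List.Pairwise.imp (fun h => ne_of_lt h) plf
  have n2 : ((((seg 1 S).filter (fun j => decide (j ∣ a) && !(j * j == a))).map
      (fun j => a / j)).reverse).Nodup :=
    List.Pairwise.imp (fun h => ne_of_lt h) pLrev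
  exact List.Perm.eq_of_pairwise'
    (List.Pairwise.imp (fun h => le_of_lt h) plf)
    (List.Pairwise.imp (fun h => le_of_lt h) pLrev)
    ((List.perm_ext_iff_of_nodup n1 n2).2 memiff)

theorem main_pos (a : Int) (ha : 1 ≤ a) : divTab a = divTab_alt a := by
  have hN : ((a.toNat : Nat) : Int) = a := Int.toNat_of_nonneg (by omega)
  have hs1 : (1 : Int) ≤ (Nat.sqrt a.toNat : Int) := by
    have := Nat.sqrt_pos.mpr (show 0 < a.toNat by omega)
    exact_mod_cast this
  have hsa : ((Nat.sqrt a.toNat : Int)) * (Nat.sqrt a.toNat : Int) ≤ a := by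
    have h := Nat.sqrt_le a.toNat
    have : ((Nat.sqrt a.toNat * Nat.sqrt a.toNat : Nat) : Int) ≤ ((a.toNat : Nat) : Int) := by
      exact_mod_cast h
    push_cast at this
    omega
  have hsa' : a < ((Nat.sqrt a.toNat : Int) + 1) * ((Nat.sqrt a.toNat : Int) + 1) := by
    have h := Nat.lt_succ_sqrt a.toNat
    have : ((a.toNat : Nat) : Int) < ((Nat.succ (Nat.sqrt a.toNat) * Nat.succ (Nat.sqrt a.toNat) : Nat) : Int) := by
      exact_mod_cast h
    push_cast at this
    omega
  have hSle : Nat.sqrt a.toNat ≤ a.toNat := Nat.sqrt_le_self _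
  -- A's loop yields take 10 of all divisors in [1, a]
  have hA : divTab a
      = ((seg 1 a.toNat).filter (fun j => PySem.Int.mod a j == 0)).take 10 := by
    have h := loopA_eq a a.toNat 1 [] (by omega)
    simpa [divTab] using h
  -- B's loop yields the small divisors and the large cofactors
  have hB := loopB_eq a (Nat.sqrt a.toNat : Int) hs1 hsa hsa' (Nat.sqrt a.toNat) 1 [] []
    (by omega) (by simp)
  have hAlt : divTab_alt a
      = (((seg 1 (Nat.sqrt a.toNat)).filter (fun j => PySem.Int.mod a j == 0))
        ++ (((seg 1 (Nat.sqrt a.toNat)).filter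
              (fun j => PySem.Int.mod a j == 0 && !(j * j == a))).map
            (fun j => PySem.Int.floordiv a j)).reverse).take 10 := by
    rw [divTab_alt]
    rw [hB]
    simp
  -- the two divisor lists coincide
  have key : (seg 1 a.toNat).filter (fun j => PySem.Int.mod a j == 0)
      = ((seg 1 (Nat.sqrt a.toNat)).filter (fun j => PySem.Int.mod a j == 0))
        ++ (((seg 1 (Nat.sqrt a.toNat)).filter
              (fun j => PySem.Int.mod a j == 0 && !(j * j == a))).map
            (fun j => PySem.Int.floordiv a j)).reverse := by
    have hsplit : seg 1 a.toNat
        = seg 1 (Nat.sqrt a.toNat) ++ seg ((Nat.sqrt a.toNat : Int) + 1) (a.toNat - Nat.sqrt a.toNat) := by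
      have h := seg_split (Nat.sqrt a.toNat) (a.toNat - Nat.sqrt a.toNat) 1
      rw [Nat.add_sub_cancel' hSle] at h
      have e : 1 + (Nat.sqrt a.toNat : Int) = (Nat.sqrt a.toNat : Int) + 1 := by ring
      rw [h, e]
    rw [hsplit, List.filter_append]
    congr 1
    rw [mod_filter_eq a _ _ (by omega)]
    have e1 : (seg 1 (Nat.sqrt a.toNat)).filter (fun j => PySem.Int.mod a j == 0 && !(j * j == a))
        = (seg 1 (Nat.sqrt a.toNat)).filter (fun j => decide (j ∣ a) && !(j * j == a)) := by
      apply List.filter_congr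
      intro x hx
      have hx1 : 1 ≤ x := by have := (mem_seg x _ 1).1 hx; omega
      rw [Bool.eq_iff_iff]
      simp [PySem.Int.mod_eq_zero_iff_dvd]
    have e2 : ((seg 1 (Nat.sqrt a.toNat)).filter (fun j => decide (j ∣ a) && !(j * j == a))).map
          (fun j => PySem.Int.floordiv a j)
        = ((seg 1 (Nat.sqrt a.toNat)).filter (fun j => decide (j ∣ a) && !(j * j == a))).map
          (fun j => a / j) := by
      apply List.map_congr_left
      intro x hx
      simp only [List.mem_filter] at hx
      have hx1 : 1 ≤ x := by have := (mem_seg x _ 1).1 hx.1; omega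
      exact PySem.Int.floordiv_eq_ediv_of_pos (by omega)
    rw [e1, e2]
    exact cofactor_eq a (Nat.sqrt a.toNat : Int) ha hs1 hsa hsa' (Nat.sqrt a.toNat) a.toNat rfl hN
  rw [hA, hAlt, key]

-- ===== VERDICT (by name: the statement is the Claim_ definition above) =====
theorem divTab_spec : Claim_equal_divTab := by
  intro a _
  unfold Spec_divTab
  by_cases h : a ≤ 0
  · exact both_nonpos a h
  · exact main_pos a (by omega)
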